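-- pv_equiv track=rewrite | github.com/YadaYuki/cracking-coding-interview-python | 8/multiple_recursion.py | multiple_recursion
-- ===== SOURCE A (Python) =====
-- def multiple_recursion(bigger,smaller,memo):
--   if smaller == 0:
--     return 0
--   elif smaller == 1:
--     return bigger
--   elif memo[smaller] != 0:
--     return memo[smaller]
--
--   s = int(smaller/2)
--   s1 = multiple_recursion(bigger,s,memo)
--   s2 = 0
--   if smaller % 2 == 1:
--     s2 = multiple_recursion(bigger,s+1,memo)
--   else :
--     s2 = multiple_recursion(bigger,s,memo)
--
--   memo[smaller] = s1 + s2
--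
--   return s1 + s2
-- ===== SOURCE B (Python) =====
-- def multiple_recursion(bigger, smaller, memo):
--     # Iterative: explicit work stack with a running total; the memo list is read
--     # but never written (return value only; no caching side effect).
--     total = 0
--     stack = [smaller]
--     while stack:
--         n = stack.pop()
--         if n == 0:
--             continue
--         if n == 1:
--             total += bigger
--             continue
--         v = memo[n]
--         if v != 0:
--             total += v
--             continue
--         h = n // 2
--         stack.append(h)
--         stack.append(n - h)
--     return total
-- ===== Notes on version B (the rewrite author's own statement) =====
-- stated objective: alternative
-- what changed: Replaces A's memoizing recursion that writes partial products into the caller's memo list with an iterative explicit-stack traversal accumulating a running sum and never writing to memo; Pre_ excludes only the negative smaller whose first memo lookup is zero, where A's value comes from Python's negative-index wraparound into memo (outside the task's natural domain) and B's plain floor-halving loop may not terminate.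
-- outside the precondition, e.g. on multiple_recursion(3, -2, [0, 0, 0, 0]): A returns 6, B does not finish within the time limit
import Mathlib
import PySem

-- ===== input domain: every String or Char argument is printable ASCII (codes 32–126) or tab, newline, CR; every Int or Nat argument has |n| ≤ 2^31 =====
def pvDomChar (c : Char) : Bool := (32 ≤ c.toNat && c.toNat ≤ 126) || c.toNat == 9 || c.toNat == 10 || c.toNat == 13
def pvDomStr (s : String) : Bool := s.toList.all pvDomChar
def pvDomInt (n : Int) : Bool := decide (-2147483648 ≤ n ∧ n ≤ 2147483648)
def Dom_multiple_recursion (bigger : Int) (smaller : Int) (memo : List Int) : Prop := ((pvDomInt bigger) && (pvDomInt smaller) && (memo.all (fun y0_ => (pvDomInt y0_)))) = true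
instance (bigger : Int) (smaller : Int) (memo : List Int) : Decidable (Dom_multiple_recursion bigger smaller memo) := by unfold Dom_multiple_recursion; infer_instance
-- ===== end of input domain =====

-- B replaces A's memoizing recursion (which writes partial products into the caller's memo
-- list) with an iterative explicit-stack traversal accumulating a running sum; the return
-- values are proved equal on the natural domain smaller ≥ 0, and A's in-place writes to
-- memo are a side effect B does not perform.

-- ===== PORT A =====
-- recursion-depth bound used as structural fuel (a totality guard only, proved never reached)
def pvMeasure (n : Int) : Nat := 2 * n.natAbs + (if n < 0 then 1 else 0)

-- A's `s = int(smaller/2)`: float division then truncation toward zero; exact for |n| ≤ 2^31 < 2^53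
def pvTruncHalf (n : Int) : Int := if 0 ≤ n then n / 2 else -((-n) / 2)

-- port of A; the memo list is mutated (`memo[smaller] = s1 + s2`), so the recursion threads it.
-- The Nat argument is fuel: it starts strictly above the recursion depth and is never exhausted.
def pvMrA : Nat → Int → Int → List Int → Int × List Int
  | 0, _, _, memo => (0, memo)   -- fuel guard, unreachable from multiple_recursion
  | fuel + 1, bigger, smaller, memo =>
    if smaller = 0 then (0, memo)
    else if smaller = 1 then (bigger, memo)
    else
      match PySem.List.pyGet? memo smaller with
      | none => (0, memo)   -- `memo[smaller]` raises IndexError here; excluded by Pre_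
      | some v =>
        if v ≠ 0 then (v, memo)
        else
          let s := pvTruncHalf smaller
          let p1 := pvMrA fuel bigger s memo
          let p2 := if PySem.Int.mod smaller 2 = 1
                    then pvMrA fuel bigger (s + 1) p1.2
                    else pvMrA fuel bigger s p1.2
          (p1.1 + p2.1, PySem.List.pySetD p2.2 smaller (p1.1 + p2.1))

def multiple_recursion (bigger : Int) (smaller : Int) (memo : List Int) : Int :=
  (pvMrA (pvMeasure smaller + 1) bigger smaller memo).1

-- ===== PORT B =====
-- potential of the work stack: strictly decreases at every loop step on the claimed domain,
-- so it bounds the number of iterations and serves as fuel (a totality guard, never exhausted)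
def pvPhi (stack : List Int) : Nat := (stack.map fun n => 3 ^ n.toNat).sum

-- port of B: `while stack: n = stack.pop(); …` — head of the list is the top of the stack;
-- `h = n // 2` is Lean's Int `/` (floor division, exact for Python `//`)
def pvMrBLoop : Nat → Int → List Int → Int → List Int → Int
  | 0, _, _, total, _ => total   -- fuel guard, unreachable from multiple_recursion_alt on Pre_
  | fuel + 1, bigger, memo, total, stack =>
    match stack with
    | [] => total
    | n :: rest =>
      if n = 0 then pvMrBLoop fuel bigger memo total rest
      else if n = 1 then pvMrBLoop fuel bigger memo (total + bigger) rest
      else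
        match PySem.List.pyGet? memo n with
        | none => pvMrBLoop fuel bigger memo total rest   -- `memo[n]` raises IndexError here; excluded by Pre_
        | some v =>
          if v ≠ 0 then pvMrBLoop fuel bigger memo (total + v) rest
          else pvMrBLoop fuel bigger memo total ((n - n / 2) :: (n / 2) :: rest)

def multiple_recursion_alt (bigger : Int) (smaller : Int) (memo : List Int) : Int :=
  pvMrBLoop (pvPhi [smaller] + 1) bigger memo 0 [smaller]

-- ===== PRECONDITION & SPEC =====
-- Pre_ is the task's natural domain — a non-negative multiplier with every memo access in
-- range — plus the negative smaller whose first memo lookup is a non-zero cache hit (both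
-- programs just return it). It excludes smaller ≥ max(2, len(memo)), where A raises
-- IndexError, and the remaining negative smaller, where A's value comes from Python's
-- negative-index wraparound into memo (and B's floor-halving loop may not terminate).
def Pre_multiple_recursion (bigger : Int) (smaller : Int) (memo : List Int) : Prop :=
  (0 ≤ smaller ∧ (smaller ≤ 1 ∨ smaller < memo.length)) ∨
  (smaller < 0 ∧ ∃ v, PySem.List.pyGet? memo smaller = some v ∧ v ≠ 0)
instance (bigger : Int) (smaller : Int) (memo : List Int) : Decidable (Pre_multiple_recursion bigger smaller memo) := by unfold Pre_multiple_recursion; infer_instance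

def pvWitness_multiple_recursion : Int × Int × List Int := (3, 5, [0, 0, 0, 0, 0, 0])

def Spec_multiple_recursion (bigger : Int) (smaller : Int) (memo : List Int) (out : Int) : Prop := out = multiple_recursion_alt bigger smaller memo
instance (bigger : Int) (smaller : Int) (memo : List Int) (out : Int) : Decidable (Spec_multiple_recursion bigger smaller memo out) := by unfold Spec_multiple_recursion; infer_instance

-- ===== CLAIM (what is proved, stated in full; the proofs are below) =====
def Claim_equal_multiple_recursion : Prop := ∀ (bigger : Int) (smaller : Int) (memo : List Int), Dom_multiple_recursion bigger smaller memo → Pre_multiple_recursion bigger smaller memo → Spec_multiple_recursion bigger smaller memo (multiple_recursion bigger smaller memo)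

-- ===== LEMMAS AND PROOFS =====

-- pure value specification of the shared recursion: the bridge between the two ports
def pvG (bigger : Int) (memo : List Int) (n : Int) : Int :=
  if n ≤ 0 then 0
  else if n = 1 then bigger
  else
    match PySem.List.pyGet? memo n with
    | none => 0
    | some v =>
      if v ≠ 0 then v
      else pvG bigger memo (n / 2) + pvG bigger memo (n - n / 2)
termination_by n.toNat
decreasing_by all_goals omega

-- indices the loops can meet on Pre_: base cases or in range with 2 ≤ n
def pvVis (len : Nat) (n : Int) : Prop := n = 0 ∨ n = 1 ∨ (2 ≤ n ∧ n < (len : Int))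

theorem pvVis_children (len : Nat) (n : Int) (h : pvVis len n) (h0 : n ≠ 0) (h1 : n ≠ 1) :
    pvVis len (n / 2) ∧ pvVis len (n - n / 2) := by
  unfold pvVis at *; omega

theorem pvVis_get_some (memo : List Int) (n : Int) (h : pvVis memo.length n)
    (h0 : n ≠ 0) (h1 : n ≠ 1) : ∃ v, PySem.List.pyGet? memo n = some v := by
  have hin : PySem.Raise.InRange memo.length n := by
    unfold pvVis at h; unfold PySem.Raise.InRange; omega
  cases hget : PySem.List.pyGet? memo n with
  | none => exact absurd ((PySem.List.pyGet?_eq_none_iff memo n).mp hget) (not_not_intro hin)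
  | some v => exact ⟨v, rfl⟩

theorem pvPhi_cons_gt (n : Int) (rest : List Int) : pvPhi rest < pvPhi (n :: rest) := by
  unfold pvPhi
  simp only [List.map_cons, List.sum_cons]
  have : 0 < 3 ^ n.toNat := Nat.pow_pos (by norm_num)
  omega

theorem pvPhi_push_lt (n : Int) (rest : List Int) (h2 : 2 ≤ n) :
    pvPhi ((n - n / 2) :: (n / 2) :: rest) < pvPhi (n :: rest) := by
  unfold pvPhi
  simp only [List.map_cons, List.sum_cons]
  have e1 : 3 ^ (n / 2).toNat ≤ 3 ^ (n.toNat - 1) :=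
    Nat.pow_le_pow_right (by norm_num) (by omega)
  have e2 : 3 ^ (n - n / 2).toNat ≤ 3 ^ (n.toNat - 1) :=
    Nat.pow_le_pow_right (by norm_num) (by omega)
  have h3 : 3 * 3 ^ (n.toNat - 1) = 3 ^ n.toNat := by
    conv_rhs => rw [show n.toNat = (n.toNat - 1) + 1 from by omega]
    rw [pow_succ]; ring
  have hp : 0 < 3 ^ (n.toNat - 1) := Nat.pow_pos (by norm_num)
  omega

theorem pvMrBLoop_nil (fuel : Nat) (bigger : Int) (memo : List Int) (total : Int) :
    pvMrBLoop fuel bigger memo total [] = total := by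
  cases fuel <;> rfl

-- B's loop returns the running total plus the pvG-value of every pending index
theorem pvMrBLoop_eq (bigger : Int) (memo : List Int) :
    ∀ (fuel : Nat) (stack : List Int), pvPhi stack < fuel →
      (∀ n ∈ stack, pvVis memo.length n) → ∀ total : Int,
      pvMrBLoop fuel bigger memo total stack = total + (stack.map (pvG bigger memo)).sum := by
  intro fuel
  induction fuel with
  | zero => intro stack hphi; omega
  | succ N ih =>
    intro stack hphi hvis total
    cases stack with
    | nil => simp [pvMrBLoop]
    | cons n rest =>
      have hvn : pvVis memo.length n := hvis n List.mem_cons_self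
      have hvr : ∀ m ∈ rest, pvVis memo.length m := fun m hm => hvis m (List.mem_cons_of_mem _ hm)
      have hrest : pvPhi rest < N := by have := pvPhi_cons_gt n rest; omega
      rw [pvMrBLoop]
      by_cases h0 : n = 0
      · subst h0
        rw [if_pos rfl, ih rest hrest hvr total]
        have hg : pvG bigger memo 0 = 0 := by rw [pvG]; simp
        simp only [List.map_cons, List.sum_cons, hg]
        ring
      · by_cases h1 : n = 1
        · subst h1
          rw [if_neg h0, if_pos rfl, ih rest hrest hvr (total + bigger)]
          have hg : pvG bigger memo 1 = bigger := by rw [pvG]; simp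
          simp only [List.map_cons, List.sum_cons, hg]
          ring
        · have h2 : 2 ≤ n := by unfold pvVis at hvn; omega
          obtain ⟨v, hget⟩ := pvVis_get_some memo n hvn h0 h1
          simp only [if_neg h0, if_neg h1, hget]
          by_cases hv : v = 0
          · subst hv
            have hg : pvG bigger memo n =
                pvG bigger memo (n / 2) + pvG bigger memo (n - n / 2) := by
              rw [pvG]; simp [show ¬ n ≤ 0 from by omega, if_neg h1, hget]
            have hch := pvVis_children memo.length n hvn h0 h1
            have hphi2 : pvPhi ((n - n / 2) :: (n / 2) :: rest) < N := by
              have := pvPhi_push_lt n rest h2; omega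
            have hvis2 : ∀ m ∈ (n - n / 2) :: (n / 2) :: rest, pvVis memo.length m := by
              intro m hm
              rcases List.mem_cons.mp hm with rfl | hm
              · exact hch.2
              · rcases List.mem_cons.mp hm with rfl | hm
                · exact hch.1
                · exact hvr _ hm
            rw [if_neg (by simp : ¬((0:ℤ) ≠ 0)), ih _ hphi2 hvis2 total]
            simp only [List.map_cons, List.sum_cons, hg]
            ring
          · rw [if_pos hv, ih rest hrest hvr (total + v)]
            have hg : pvG bigger memo n = v := by
              rw [pvG]; simp [show ¬ n ≤ 0 from by omega, if_neg h1, hget, hv]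
            simp only [List.map_cons, List.sum_cons, hg]
            ring

-- bridges from the pythonic primitives at the non-negative in-range indices Pre_ admits
theorem pvIdx_some (len : Nat) (i : Int) (h0 : 0 ≤ i) (h1 : i < (len : Int)) :
    PySem.List.pyIdx? len i = some i.toNat := by
  unfold PySem.List.pyIdx?
  split_ifs <;> first | rfl | omega

theorem pvGet_nonneg (xs : List Int) (i : Int) (h0 : 0 ≤ i) (h1 : i < (xs.length : Int)) :
    PySem.List.pyGet? xs i = xs[i.toNat]? := by
  unfold PySem.List.pyGet?
  rw [pvIdx_some _ _ h0 h1]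
  rfl

theorem pvSet_nonneg (xs : List Int) (i : Int) (v : Int) (h0 : 0 ≤ i) (h1 : i < (xs.length : Int)) :
    PySem.List.pySetD xs i v = xs.set i.toNat v := by
  unfold PySem.List.pySetD PySem.List.pySet?
  rw [pvIdx_some _ _ h0 h1]
  rfl

theorem pvGet_pySetD (xs : List Int) (i j : Int) (v : Int)
    (hi0 : 0 ≤ i) (hi1 : i < (xs.length : Int)) (hj0 : 0 ≤ j) :
    PySem.List.pyGet? (PySem.List.pySetD xs i v) j =
      if j = i then some v else PySem.List.pyGet? xs j := by
  have hlen : (PySem.List.pySetD xs i v).length = xs.length := PySem.List.length_pySetD xs i v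
  by_cases hj1 : j < (xs.length : Int)
  · rw [pvGet_nonneg (PySem.List.pySetD xs i v) j hj0 (by rw [hlen]; omega),
      pvSet_nonneg _ _ _ hi0 hi1, pvGet_nonneg _ _ hj0 hj1]
    by_cases he : j = i
    · rw [if_pos he, he, List.getElem?_set_self (by omega)]
    · rw [if_neg he, List.getElem?_set_ne (by omega)]
  · have hne : j ≠ i := by omega
    rw [if_neg hne]
    rw [(PySem.List.pyGet?_eq_none_iff xs j).mpr (by unfold PySem.Raise.InRange; omega),
        (PySem.List.pyGet?_eq_none_iff _ j).mpr (by unfold PySem.Raise.InRange; omega)]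

-- indices A's recursion can write: in range with 2 ≤ n
def pvCls (len : Nat) (n : Int) : Prop := 2 ≤ n ∧ n < (len : Int)

-- invariant on the mutated memo list: every writable slot holds its initial value, or the
-- initial value was 0 and the slot now holds the pure value pvG
def pvInv (bigger : Int) (memo0 : List Int) (memo' : List Int) : Prop :=
  memo'.length = memo0.length ∧
  ∀ n, pvCls memo0.length n →
    PySem.List.pyGet? memo' n = PySem.List.pyGet? memo0 n ∨
    (PySem.List.pyGet? memo0 n = some 0 ∧
      PySem.List.pyGet? memo' n = some (pvG bigger memo0 n))

theorem pvMod2_eq (n : Int) : PySem.Int.mod n 2 = n % 2 :=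
  PySem.Int.mod_eq_emod_of_pos (by norm_num)

theorem pvMrA_correct (bigger : Int) (memo0 : List Int) :
    ∀ (fuel : Nat) (n : Int) (memo' : List Int), pvMeasure n < fuel →
      pvVis memo0.length n → pvInv bigger memo0 memo' →
      (pvMrA fuel bigger n memo').1 = pvG bigger memo0 n ∧
        pvInv bigger memo0 (pvMrA fuel bigger n memo').2 := by
  intro fuel
  induction fuel with
  | zero => intro n memo' hN; unfold pvMeasure at hN; omega
  | succ N ih =>
    intro n memo' hN hvisn hinv
    by_cases h0 : n = 0
    · subst h0; rw [pvMrA, pvG]; simpa using hinv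
    · by_cases h1 : n = 1
      · subst h1; rw [pvMrA, pvG]; simpa using hinv
      · have h2 : 2 ≤ n ∧ n < (memo0.length : Int) := by unfold pvVis at hvisn; omega
        obtain ⟨v0, hget0⟩ := pvVis_get_some memo0 n hvisn h0 h1
        obtain ⟨w, hgetw⟩ : ∃ w, PySem.List.pyGet? memo' n = some w := by
          cases hg : PySem.List.pyGet? memo' n with
          | none =>
            exact absurd ((PySem.List.pyGet?_eq_none_iff memo' n).mp hg)
              (not_not_intro (by unfold PySem.Raise.InRange; rw [hinv.1]; omega))
          | some w => exact ⟨w, rfl⟩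
        rw [pvMrA]
        simp only [if_neg h0, if_neg h1, hgetw]
        have hs : pvTruncHalf n = n / 2 := by
          unfold pvTruncHalf; rw [if_pos (by omega)]
        have hmeas1 : pvMeasure (n / 2) < N := by
          unfold pvMeasure at *
          have : ¬ n / 2 < 0 := by omega
          simp only [if_neg this]
          omega
        have hmeas2 : pvMeasure (n - n / 2) < N := by
          unfold pvMeasure at *
          have : ¬ n - n / 2 < 0 := by omega
          simp only [if_neg this]
          omega
        have hch := pvVis_children memo0.length n hvisn h0 h1
        by_cases hw : w = 0
        · -- memo hit failed: recurse, then write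
          subst hw
          have hv0 : v0 = 0 := by
            rcases hinv.2 n ⟨h2.1, h2.2⟩ with hL | hR
            · rw [hgetw, hget0] at hL; exact (Option.some.injEq _ _).mp hL.symm
            · rw [hget0] at hR; exact (Option.some.injEq _ _).mp hR.1
          subst hv0
          have hg : pvG bigger memo0 n =
              pvG bigger memo0 (n / 2) + pvG bigger memo0 (n - n / 2) := by
            rw [pvG]; simp [show ¬ n ≤ 0 from by omega, if_neg h1, hget0]
          rw [if_neg (by simp : ¬((0:ℤ) ≠ 0)), hs]
          obtain ⟨ih1, ihInv1⟩ := ih (n / 2) memo' hmeas1 hch.1 hinv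
          have hsecond : ∀ (m : Int), m = n - n / 2 →
              (pvMrA N bigger m (pvMrA N bigger (n / 2) memo').2).1 = pvG bigger memo0 (n - n / 2) ∧
              pvInv bigger memo0 (pvMrA N bigger m (pvMrA N bigger (n / 2) memo').2).2 := by
            intro m hm; subst hm
            exact ih (n - n / 2) _ hmeas2 hch.2 ihInv1
          have hfin : ∀ (p2 : Int × List Int),
              p2.1 = pvG bigger memo0 (n - n / 2) → pvInv bigger memo0 p2.2 →
              ((pvMrA N bigger (n / 2) memo').1 + p2.1 = pvG bigger memo0 n ∧
               pvInv bigger memo0 (PySem.List.pySetD p2.2 n ((pvMrA N bigger (n / 2) memo').1 + p2.1))) := by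
            intro p2 hp1 hpInv
            refine ⟨by rw [ih1, hp1, hg], ?_⟩
            constructor
            · rw [PySem.List.length_pySetD]; exact hpInv.1
            · intro m hclsm
              have hlen2 : p2.2.length = memo0.length := hpInv.1
              rw [pvGet_pySetD _ n m _ (by omega) (by omega) (by unfold pvCls at hclsm; omega)]
              by_cases hmn : m = n
              · subst hmn
                rw [if_pos rfl, ih1, hp1, ← hg]
                exact Or.inr ⟨hget0, rfl⟩
              · rw [if_neg hmn]
                exact hpInv.2 m hclsm
          by_cases hmod : PySem.Int.mod n 2 = 1
          · simp only [if_pos hmod]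
            have hmod' := pvMod2_eq n
            have hc2 : n / 2 + 1 = n - n / 2 := by omega
            obtain ⟨ha, hb⟩ := hsecond (n / 2 + 1) hc2
            exact hfin _ ha hb
          · simp only [if_neg hmod]
            have hmod' := pvMod2_eq n
            have hc2 : n / 2 = n - n / 2 := by omega
            obtain ⟨ha, hb⟩ := hsecond (n / 2) hc2
            exact hfin _ ha hb
        · -- memo hit: returned value is the cached one, which equals pvG
          simp only [if_pos hw]
          refine ⟨?_, hinv⟩
          rcases hinv.2 n ⟨h2.1, h2.2⟩ with hL | hR
          · rw [hgetw, hget0] at hL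
            have hv0 : w = v0 := (Option.some.injEq _ _).mp hL
            rw [pvG]
            simp only [show ¬ n ≤ 0 from by omega, if_neg h1, hget0, if_false]
            rw [if_pos (show v0 ≠ 0 from hv0 ▸ hw)]
            exact hv0
          · rw [hgetw] at hR
            exact (Option.some.injEq _ _).mp hR.2

-- ===== VERDICT (by name: the statement is the Claim_ definition above) =====
theorem multiple_recursion_spec : Claim_equal_multiple_recursion := by
  unfold Claim_equal_multiple_recursion
  intro bigger smaller memo _ hpre
  unfold Spec_multiple_recursion multiple_recursion multiple_recursion_alt
  unfold Pre_multiple_recursion at hpre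
  rcases hpre with hpre | ⟨hneg, v, hget, hv⟩
  case inr =>
    have h0 : smaller ≠ 0 := by omega
    have h1 : smaller ≠ 1 := by omega
    rw [pvMrBLoop]
    simp only [if_neg h0, if_neg h1, hget, if_pos hv]
    rw [pvMrBLoop_nil]
    rw [pvMrA]
    simp only [if_neg h0, if_neg h1, hget, if_pos hv]
    ring
  have hvis : pvVis memo.length smaller := by unfold pvVis; omega
  have hB : pvMrBLoop (pvPhi [smaller] + 1) bigger memo 0 [smaller] = pvG bigger memo smaller := by
    rw [pvMrBLoop_eq bigger memo (pvPhi [smaller] + 1) [smaller] (by omega)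
      (by intro m hm; rw [List.mem_singleton] at hm; exact hm ▸ hvis) 0]
    simp
  rw [hB]
  exact (pvMrA_correct bigger memo (pvMeasure smaller + 1) smaller memo (by omega) hvis
    ⟨rfl, fun m _ => Or.inl rfl⟩).1
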